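-- pv_equiv track=rewrite | github.com/weiya711/sam | sam/sim/src/channel.py | hash_tile
-- ===== SOURCE A (Python) =====
-- def hash_tile(tile_id):
--     hash_val = 0
--     num = len(tile_id) // 2
--     cnt = 0
--     encoder = 1
--     encoder_diff = 10000
--     for a in reversed(tile_id):
--         hash_val += encoder * a
--         encoder *= encoder_diff
--         cnt += 1
--     return hash_val, hash_val // (encoder_diff ** num)
-- ===== SOURCE B (Python) =====
-- def hash_tile(tile_id):
--     hash_val = 0
--     for a in tile_id:
--         hash_val = hash_val * 10000 + a
--     num = len(tile_id) // 2
--     return hash_val, hash_val // (10000 ** num)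
-- ===== Notes on version B (the rewrite author's own statement) =====
-- stated objective: simpler
-- what changed: Forward Horner fold (hash = hash*10000 + a) replaces the reversed traversal with a running power variable and the unused cnt counter.
import Mathlib
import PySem

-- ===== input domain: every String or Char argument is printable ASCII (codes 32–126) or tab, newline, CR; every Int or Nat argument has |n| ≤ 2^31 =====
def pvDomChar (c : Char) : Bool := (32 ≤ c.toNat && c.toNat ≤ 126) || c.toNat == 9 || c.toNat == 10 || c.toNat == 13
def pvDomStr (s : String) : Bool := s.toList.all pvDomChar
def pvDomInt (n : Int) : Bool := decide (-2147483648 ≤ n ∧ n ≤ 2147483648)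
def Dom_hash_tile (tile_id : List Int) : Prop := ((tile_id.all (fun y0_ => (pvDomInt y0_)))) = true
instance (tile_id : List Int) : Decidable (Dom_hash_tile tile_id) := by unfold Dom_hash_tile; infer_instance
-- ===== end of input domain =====

-- B replaces A's reversed traversal with running power/counter state by a forward Horner fold (simpler).

-- ===== PORT A =====
-- A: loop over reversed(tile_id) carrying (hash_val, encoder, cnt); return (hash_val, hash_val // 10000^(len//2))
def hash_tile (tile_id : List Int) : Int × Int :=
  let num : Nat := tile_id.length / 2
  let s : Int × Int × Int :=
    tile_id.reverse.foldl
      (fun (s : Int × Int × Int) a => (s.1 + s.2.1 * a, s.2.1 * 10000, s.2.2 + 1))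
      (0, 1, 0)
  (s.1, PySem.Int.floordiv s.1 ((10000 : Int) ^ num))

-- ===== PORT B =====
def hash_tile_alt (tile_id : List Int) : Int × Int :=
  let hash_val : Int := tile_id.foldl (fun h a => h * 10000 + a) 0
  let num : Nat := tile_id.length / 2
  (hash_val, PySem.Int.floordiv hash_val ((10000 : Int) ^ num))

-- ===== PRECONDITION & SPEC =====
def Spec_hash_tile (tile_id : List Int) (out : Int × Int) : Prop := out = hash_tile_alt tile_id
instance (tile_id : List Int) (out : Int × Int) : Decidable (Spec_hash_tile tile_id out) := by unfold Spec_hash_tile; infer_instance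

-- ===== CLAIM (what is proved, stated in full; the proofs are below) =====
def Claim_equal_hash_tile : Prop := ∀ (tile_id : List Int), Dom_hash_tile tile_id → Spec_hash_tile tile_id (hash_tile tile_id)

-- ===== LEMMAS AND PROOFS =====

-- Horner fold with a nonzero initial accumulator.
theorem horner_init (xs : List Int) (h : Int) :
    xs.foldl (fun h a => h * 10000 + a) h
      = h * (10000 : Int) ^ xs.length + xs.foldl (fun h a => h * 10000 + a) 0 := by
  induction xs generalizing h with
  | nil => simp
  | cons x rest ih =>
    simp only [List.foldl_cons, List.length_cons]
    rw [ih (h * 10000 + x), ih (0 * 10000 + x)]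
    ring

-- A's reversed loop computes h + e * (Horner value); the encoder becomes e * 10000^len.
theorem aloop_eq (xs : List Int) (h e c : Int) :
    xs.reverse.foldl
      (fun (s : Int × Int × Int) a => (s.1 + s.2.1 * a, s.2.1 * 10000, s.2.2 + 1))
      (h, e, c)
    = (h + e * xs.foldl (fun h a => h * 10000 + a) 0,
       e * (10000 : Int) ^ xs.length, c + xs.length) := by
  induction xs generalizing h e c with
  | nil => simp
  | cons x rest ih =>
    simp only [List.reverse_cons, List.foldl_append, List.foldl_cons, List.foldl_nil,
      List.length_cons, ih]
    rw [horner_init rest (0 * 10000 + x)]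
    refine Prod.ext ?_ (Prod.ext ?_ ?_) <;> simp <;> [ring; ring; omega]

-- ===== VERDICT (by name: the statement is the Claim_ definition above) =====
theorem hash_tile_spec : Claim_equal_hash_tile := by
  intro tile_id _
  unfold Spec_hash_tile hash_tile hash_tile_alt
  simp only [aloop_eq, zero_add, one_mul]
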